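-- pv_equiv track=rewrite | github.com/defarloa1-alt/graph1 | scripts/federation/adr007_section3_person_noise_cleanup.py | get_entity_type_from_p31
-- ===== SOURCE A (Python) =====
-- def _normalize_label(s: str) -> str:
--     return (s or "").strip().lower()
--
-- def get_entity_type_from_p31(p31_targets: list[dict]) -> str:
--     """Infer correct entity_type from P31 targets for non-persons."""
--     if not p31_targets:
--         return "CONCEPT"  # unknown
--     labels = [_normalize_label(t.get("label") or "") for t in p31_targets]
--     qids = [(t.get("qid") or "").upper() for t in p31_targets]
--     # Place types
--     if any(q in qids for q in ("Q2221906", "Q515", "Q1549591", "Q15634554")):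
--         return "PLACE"
--     if any("place" in l or "region" in l or "city" in l for l in labels):
--         return "PLACE"
--     # Event
--     if any(q in qids for q in ("Q1190554", "Q1656682", "Q198", "Q178561")):
--         return "EVENT"
--     # Concept
--     if any(q in qids for q in ("Q151885", "Q16889133", "Q4167836")):
--         return "CONCEPT"
--     return "CONCEPT"
-- ===== SOURCE B (Python) =====
-- _PLACE_QIDS = ("Q2221906", "Q515", "Q1549591", "Q15634554")
-- _EVENT_QIDS = ("Q1190554", "Q1656682", "Q198", "Q178561")
--
-- def _is_place_target(t):
--     q = (t.get("qid") or "").upper()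
--     l = (t.get("label") or "").strip().lower()
--     return q in _PLACE_QIDS or "place" in l or "region" in l or "city" in l
--
-- def _is_event_target(t):
--     return (t.get("qid") or "").upper() in _EVENT_QIDS
--
-- def get_entity_type_from_p31(p31_targets: list[dict]) -> str:
--     """Infer correct entity_type from P31 targets for non-persons."""
--     found_place = False
--     found_event = False
--     for t in p31_targets:
--         if _is_place_target(t):
--             found_place = True
--         elif _is_event_target(t):
--             found_event = True
--     if found_place:
--         return "PLACE"
--     if found_event:
--         return "EVENT"
--     return "CONCEPT"
-- ===== Notes on version B (the rewrite author's own statement) =====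
-- stated objective: simpler
-- what changed: Replaced the intermediate labels/qids lists and four separate any() scans with one pass over the targets maintaining two boolean flags, deciding PLACE > EVENT > CONCEPT after the pass.
import Mathlib
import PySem

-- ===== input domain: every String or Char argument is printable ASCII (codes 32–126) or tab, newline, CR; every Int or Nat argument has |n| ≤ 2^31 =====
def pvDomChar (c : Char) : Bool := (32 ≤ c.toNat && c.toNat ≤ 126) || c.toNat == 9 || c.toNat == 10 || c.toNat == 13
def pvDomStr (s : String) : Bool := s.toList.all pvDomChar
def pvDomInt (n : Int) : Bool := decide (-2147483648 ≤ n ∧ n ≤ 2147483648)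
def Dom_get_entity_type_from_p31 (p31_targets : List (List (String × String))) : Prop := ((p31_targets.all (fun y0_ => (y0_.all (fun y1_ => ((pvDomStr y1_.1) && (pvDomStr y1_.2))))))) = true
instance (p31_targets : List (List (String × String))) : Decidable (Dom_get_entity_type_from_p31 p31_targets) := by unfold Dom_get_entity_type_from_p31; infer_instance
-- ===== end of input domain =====

-- B replaces A's two intermediate lists and four any() scans with one pass keeping two
-- boolean flags and a final PLACE > EVENT > CONCEPT decision (objective: simpler).

-- ===== PORT A =====
-- (s or "").strip().lower(); 'x or ""' coincides with defaulting to "" since "" is the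
-- only falsy str, so t.get(k) or "" is ported as Dict.getD t k "".
def normalizeLabel (s : String) : String := PySem.Str.lower (PySem.Str.strip s)

def get_entity_type_from_p31 (p31_targets : List (List (String × String))) : String :=
  if p31_targets = [] then "CONCEPT"
  else
    let labels := p31_targets.map (fun t => normalizeLabel ((PySem.Dict.mk t).getD "label" ""))
    let qids := p31_targets.map (fun t => PySem.Str.upper ((PySem.Dict.mk t).getD "qid" ""))
    if ["Q2221906", "Q515", "Q1549591", "Q15634554"].any (fun q => qids.contains q) then "PLACE"
    else if labels.any (fun l => PySem.Str.isIn "place" l || PySem.Str.isIn "region" l || PySem.Str.isIn "city" l) then "PLACE"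
    else if ["Q1190554", "Q1656682", "Q198", "Q178561"].any (fun q => qids.contains q) then "EVENT"
    else if ["Q151885", "Q16889133", "Q4167836"].any (fun q => qids.contains q) then "CONCEPT"
    else "CONCEPT"

-- ===== PORT B =====
def isPlaceTarget (t : List (String × String)) : Bool :=
  let q := PySem.Str.upper ((PySem.Dict.mk t).getD "qid" "")
  let l := PySem.Str.lower (PySem.Str.strip ((PySem.Dict.mk t).getD "label" ""))
  ["Q2221906", "Q515", "Q1549591", "Q15634554"].contains q
    || PySem.Str.isIn "place" l || PySem.Str.isIn "region" l || PySem.Str.isIn "city" l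

def isEventTarget (t : List (String × String)) : Bool :=
  ["Q1190554", "Q1656682", "Q198", "Q178561"].contains (PySem.Str.upper ((PySem.Dict.mk t).getD "qid" ""))

def get_entity_type_from_p31_alt (p31_targets : List (List (String × String))) : String :=
  let r := p31_targets.foldl
    (fun acc t =>
      if isPlaceTarget t then (true, acc.2)
      else if isEventTarget t then (acc.1, true)
      else acc)
    (false, false)
  if r.1 then "PLACE" else if r.2 then "EVENT" else "CONCEPT"

-- ===== PRECONDITION & SPEC =====
def Spec_get_entity_type_from_p31 (p31_targets : List (List (String × String))) (out : String) : Prop := out = get_entity_type_from_p31_alt p31_targets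
instance (p31_targets : List (List (String × String))) (out : String) : Decidable (Spec_get_entity_type_from_p31 p31_targets out) := by unfold Spec_get_entity_type_from_p31; infer_instance

-- ===== CLAIM (what is proved, stated in full; the proofs are below) =====
def Claim_equal_get_entity_type_from_p31 : Prop := ∀ (p31_targets : List (List (String × String))), Dom_get_entity_type_from_p31 p31_targets → Spec_get_entity_type_from_p31 p31_targets (get_entity_type_from_p31 p31_targets)

-- ===== LEMMAS AND PROOFS =====

-- 'any(q in M for q in L)' over M = xs.map f equals a per-target membership test.
theorem any_swap (L : List String) (f : List (String × String) → String)
    (xs : List (List (String × String))) :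
    (L.any fun q => (xs.map f).contains q) = xs.any (fun t => L.contains (f t)) := by
  rw [Bool.eq_iff_iff]
  simp only [List.any_eq_true, List.contains_eq_mem, List.mem_map, decide_eq_true_eq]
  constructor
  · rintro ⟨q, hq, t, ht, rfl⟩; exact ⟨t, ht, hq⟩
  · rintro ⟨t, ht, hm⟩; exact ⟨f t, hm, t, ht, rfl⟩

-- two any() scans over the same list merge into one
theorem or_any (xs : List (List (String × String)))
    (p q : List (String × String) → Bool) :
    (xs.any p || xs.any q) = xs.any (fun t => p t || q t) := by
  rw [Bool.eq_iff_iff]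
  simp only [Bool.or_eq_true, List.any_eq_true]
  constructor
  · rintro (⟨t, ht, h⟩ | ⟨t, ht, h⟩) <;> exact ⟨t, ht, by simp [h]⟩
  · rintro ⟨t, ht, h⟩; rcases h with h | h
    · exact Or.inl ⟨t, ht, h⟩
    · exact Or.inr ⟨t, ht, h⟩

-- B's loop invariant.
theorem foldl_flags (xs : List (List (String × String))) (p e : Bool) :
    xs.foldl
      (fun acc t =>
        if isPlaceTarget t then (true, acc.2)
        else if isEventTarget t then (acc.1, true)
        else acc)
      (p, e)
    = (p || xs.any isPlaceTarget,
       e || xs.any (fun t => !isPlaceTarget t && isEventTarget t)) := by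
  induction xs generalizing p e with
  | nil => simp
  | cons t xs ih =>
    simp only [List.foldl_cons, List.any_cons]
    by_cases hP : isPlaceTarget t
    · simp [hP, ih]
    · by_cases hE : isEventTarget t
      · simp [hP, hE, ih]
      · simp [hP, hE, ih]

theorem any_event_of_no_place (xs : List (List (String × String)))
    (h : xs.any isPlaceTarget = false) :
    xs.any (fun t => !isPlaceTarget t && isEventTarget t) = xs.any isEventTarget := by
  simp only [List.any_eq_false] at h
  rw [Bool.eq_iff_iff]
  simp only [List.any_eq_true, Bool.and_eq_true]
  constructor
  · rintro ⟨t, ht, _, hE⟩; exact ⟨t, ht, hE⟩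
  · rintro ⟨t, ht, hE⟩; exact ⟨t, ht, by simp [h t ht], hE⟩

-- ===== VERDICT (by name: the statement is the Claim_ definition above) =====
theorem get_entity_type_from_p31_spec : Claim_equal_get_entity_type_from_p31 := by
  intro xs _
  unfold Spec_get_entity_type_from_p31
  simp only [get_entity_type_from_p31, get_entity_type_from_p31_alt]
  rw [foldl_flags]
  by_cases hnil : xs = []
  · subst hnil; rfl
  · simp only [if_neg hnil, Bool.false_or]
    rw [any_swap, any_swap, any_swap, List.any_map]
    have hA : ((xs.any fun t =>
        List.contains ["Q2221906", "Q515", "Q1549591", "Q15634554"]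
          (PySem.Str.upper ((PySem.Dict.mk t).getD "qid" ""))) ||
        (xs.any ((fun l => PySem.Str.isIn "place" l || PySem.Str.isIn "region" l || PySem.Str.isIn "city" l)
          ∘ (fun t => normalizeLabel ((PySem.Dict.mk t).getD "label" "")))))
        = xs.any isPlaceTarget := by
      rw [or_any]; refine List.any_congr rfl ?_; intro t
      simp [isPlaceTarget, normalizeLabel, Function.comp, Bool.or_assoc]
    have hE : (xs.any fun t =>
        List.contains ["Q1190554", "Q1656682", "Q198", "Q178561"]
          (PySem.Str.upper ((PySem.Dict.mk t).getD "qid" "")))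
        = xs.any isEventTarget := rfl
    by_cases hp : xs.any isPlaceTarget = true
    · have h12 := hA.trans hp
      rw [if_pos hp]
      rcases Bool.or_eq_true_iff.mp h12 with h | h
      · rw [if_pos h]
      · by_cases h1 : (xs.any fun t =>
            List.contains ["Q2221906", "Q515", "Q1549591", "Q15634554"]
              (PySem.Str.upper ((PySem.Dict.mk t).getD "qid" ""))) = true
        · rw [if_pos h1]
        · rw [if_neg h1, if_pos h]
    · have hpf : xs.any isPlaceTarget = false := by simpa using hp
      have h12 := hA.trans hpf
      rcases Bool.or_eq_false_iff.mp h12 with ⟨h1, h2⟩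
      rw [any_event_of_no_place xs hpf]
      rw [if_neg (by rw [h1]; simp), if_neg (by rw [h2]; simp), hE]
      by_cases he : xs.any isEventTarget = true
      · rw [if_pos he, if_neg (by rw [hpf]; simp), if_pos he]
      · rw [if_neg he, ite_self, if_neg (by rw [hpf]; simp), if_neg he]
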